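-- pv_equiv track=rewrite | github.com/EdimarDeSa/Validador_de_cadastros | Modulos/imprimir.py | contagem_de_caracteres
-- ===== SOURCE A (Python) =====
-- def contagem_de_caracteres(nome: str):
--     linha1 = ''
--     linha2 = ''
--     total_de_caracteres_linha1 = 0
--     lista_nome: list = nome.split()
--
--     for parte in lista_nome:
--         total_de_caracteres_linha1 += (len(parte) + 1)
--         if total_de_caracteres_linha1 < 30:
--             linha1 = f'{linha1} {parte}'
--         else:
--             linha2 = f'{linha2} {parte}'
--
--     linha1 = linha1.lstrip(' ')
--     linha2 = linha2.lstrip(' ')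
--     return linha1, linha2
-- ===== SOURCE B (Python) =====
-- def contagem_de_caracteres(nome: str):
--     palavras = nome.split()
--     corte = len(palavras)
--     total = 0
--     for i, palavra in enumerate(palavras):
--         total += len(palavra) + 1
--         if total >= 30:
--             corte = i
--             break
--     return ' '.join(palavras[:corte]), ' '.join(palavras[corte:])
-- ===== Notes on version B (the rewrite author's own statement) =====
-- stated objective: simpler
-- what changed: Instead of two incrementally concatenated accumulator strings plus a final lstrip, B computes the single cut index (first position where the running length total reaches 30, valid because the counter is monotonic) and returns the two joined slices.
import Mathlib
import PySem

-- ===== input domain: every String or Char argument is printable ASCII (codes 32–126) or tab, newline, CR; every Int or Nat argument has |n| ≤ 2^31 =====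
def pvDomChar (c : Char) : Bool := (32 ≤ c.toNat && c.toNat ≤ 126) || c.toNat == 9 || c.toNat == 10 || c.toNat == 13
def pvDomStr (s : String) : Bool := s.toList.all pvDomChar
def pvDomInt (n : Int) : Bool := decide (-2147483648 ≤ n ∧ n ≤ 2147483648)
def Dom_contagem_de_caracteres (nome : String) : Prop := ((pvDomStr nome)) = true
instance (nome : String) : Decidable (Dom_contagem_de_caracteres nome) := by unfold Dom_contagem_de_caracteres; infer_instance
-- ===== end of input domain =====

-- B replaces A's two incrementally concatenated accumulator strings (plus final lstrip) with a
-- single cut index computed from the running length total, returning the two joined slices (simpler).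

-- ===== PORT A =====
-- exact port of s.lstrip(' '): drop leading ' ' characters only
def pvLstripSpace (s : String) : String :=
  String.ofList (s.toList.dropWhile (fun c => c == ' '))

def contagem_de_caracteres (nome : String) : String × String :=
  let st := (PySem.Str.split₀ nome).foldl
    (fun (acc : String × String × Int) parte =>
      let tot := acc.2.2 + (PySem.Str.len parte + 1)
      if tot < 30 then (acc.1 ++ " " ++ parte, acc.2.1, tot)
      else (acc.1, acc.2.1 ++ " " ++ parte, tot))
    ("", "", 0)
  (pvLstripSpace st.1, pvLstripSpace st.2.1)

-- ===== PORT B =====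
-- the 'enumerate … break' loop of Source B as structural recursion: index of the first word whose
-- cumulative total (len+1 each) reaches 30, defaulting to the list length
def pvCut : List String → Int → Nat
  | [], _ => 0
  | p :: ps, tot =>
      let tot' := tot + (PySem.Str.len p + 1)
      if 30 ≤ tot' then 0 else pvCut ps tot' + 1

def contagem_de_caracteres_alt (nome : String) : String × String :=
  let palavras := PySem.Str.split₀ nome
  let corte := pvCut palavras 0
  (PySem.Str.join " " (palavras.take corte), PySem.Str.join " " (palavras.drop corte))

-- ===== PRECONDITION & SPEC =====
def Spec_contagem_de_caracteres (nome : String) (out : String × String) : Prop := out = contagem_de_caracteres_alt nome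
instance (nome : String) (out : String × String) : Decidable (Spec_contagem_de_caracteres nome out) := by unfold Spec_contagem_de_caracteres; infer_instance

-- ===== CLAIM (what is proved, stated in full; the proofs are below) =====
def Claim_equal_contagem_de_caracteres : Prop := ∀ (nome : String), Dom_contagem_de_caracteres nome → Spec_contagem_de_caracteres nome (contagem_de_caracteres nome)

-- ===== LEMMAS AND PROOFS =====

-- A's loop body and the fold it performs
def pvStep (acc : String × String × Int) (parte : String) : String × String × Int :=
  let tot := acc.2.2 + (PySem.Str.len parte + 1)
  if tot < 30 then (acc.1 ++ " " ++ parte, acc.2.1, tot)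
  else (acc.1, acc.2.1 ++ " " ++ parte, tot)

def pvAppAll (l : String) (xs : List String) : String :=
  xs.foldl (fun a w => a ++ " " ++ w) l

-- words produced by split₀ are nonempty and contain no whitespace
def pvWordOK (w : List Char) : Prop := w ≠ [] ∧ ∀ c ∈ w, PySem.Chars.isspace c = false

lemma pv_go_ok (s : List Char) : ∀ (cur : List Char) (acc : List (List Char)),
    (∀ c ∈ cur, PySem.Chars.isspace c = false) → (∀ w ∈ acc, pvWordOK w) →
    ∀ w ∈ PySem.Chars.split₀.go s cur acc, pvWordOK w := by
  induction s with
  | nil =>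
      intro cur acc hcur hacc w hw
      simp only [PySem.Chars.split₀.go] at hw
      split at hw
      · exact hacc w (List.mem_reverse.mp hw)
      · rename_i hne
        rcases List.mem_cons.mp (List.mem_reverse.mp hw) with h | h
        · subst h
          constructor
          · simp only [ne_eq, List.reverse_eq_nil_iff]
            intro hnil
            rw [hnil] at hne; simp at hne
          · intro c hc; exact hcur c (List.mem_reverse.mp hc)
        · exact hacc w h
  | cons c rest ih =>
      intro cur acc hcur hacc w hw
      simp only [PySem.Chars.split₀.go] at hw
      split at hw
      · split at hw
        · exact ih [] acc (by simp) hacc w hw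
        · rename_i hne
          refine ih [] (cur.reverse :: acc) (by simp) ?_ w hw
          intro v hv
          rcases List.mem_cons.mp hv with h | h
          · subst h
            constructor
            · simp only [ne_eq, List.reverse_eq_nil_iff]
              intro hnil
              rw [hnil] at hne; simp at hne
            · intro d hd; exact hcur d (List.mem_reverse.mp hd)
          · exact hacc v h
      · rename_i hns
        refine ih (c :: cur) acc ?_ hacc w hw
        intro d hd
        rcases List.mem_cons.mp hd with h | h
        · subst h; simpa using hns
        · exact hcur d h

lemma pv_split₀_ok (nome : String) : ∀ w ∈ PySem.Str.split₀ nome, pvWordOK w.toList := by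
  intro w hw
  have h := PySem.Str.split₀_map_toList nome
  have : w.toList ∈ PySem.Chars.split₀ nome.toList := by
    rw [← h]; exact List.mem_map_of_mem hw
  exact pv_go_ok nome.toList [] [] (by simp) (by simp) w.toList this

-- once the total has reached 29, every remaining word goes to line 2
lemma pv_loop_high (ws : List String) : ∀ (l1 l2 : String) (tot : Int), 29 ≤ tot →
    ws.foldl pvStep (l1, l2, tot) =
      (l1, pvAppAll l2 ws, tot + (ws.map (fun w => PySem.Str.len w + 1)).sum) := by
  induction ws with
  | nil => intro l1 l2 tot _; simp [pvAppAll]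
  | cons p ps ih =>
      intro l1 l2 tot htot
      have hlen : (0:Int) ≤ PySem.Str.len p := by
        rw [PySem.Str.len_eq]; positivity
      have hge : ¬ (tot + (PySem.Str.len p + 1) < 30) := by omega
      simp only [List.foldl_cons, pvStep, hge, if_neg, if_false]
      have := ih l1 (l2 ++ " " ++ p) (tot + (PySem.Str.len p + 1)) (by omega)
      rw [this]
      simp [pvAppAll]
      ring

-- the two accumulators of A's loop are exactly the pieces before and after the cut index
lemma pv_loop_split (ws : List String) : ∀ (l1 l2 : String) (tot : Int),
    ws.foldl pvStep (l1, l2, tot) =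
      (pvAppAll l1 (ws.take (pvCut ws tot)), pvAppAll l2 (ws.drop (pvCut ws tot)),
       tot + (ws.map (fun w => PySem.Str.len w + 1)).sum) := by
  induction ws with
  | nil => intro l1 l2 tot; simp [pvCut, pvAppAll]
  | cons p ps ih =>
      intro l1 l2 tot
      by_cases h : 30 ≤ tot + (PySem.Str.len p + 1)
      · have hcut : pvCut (p :: ps) tot = 0 := by
          simp only [pvCut]
          rw [if_pos h]
        rw [hcut]
        have hng : ¬ (tot + (PySem.Str.len p + 1) < 30) := by omega
        simp only [List.foldl_cons, pvStep]
        rw [if_neg hng]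
        rw [pv_loop_high ps l1 (l2 ++ " " ++ p) (tot + (PySem.Str.len p + 1)) (by omega)]
        simp [pvAppAll]
        ring
      · have hcut : pvCut (p :: ps) tot = pvCut ps (tot + (PySem.Str.len p + 1)) + 1 := by
          simp only [pvCut]
          rw [if_neg h]
        rw [hcut]
        have hlt : tot + (PySem.Str.len p + 1) < 30 := by omega
        simp only [List.foldl_cons, pvStep]
        rw [if_pos hlt]
        rw [ih (l1 ++ " " ++ p) l2 (tot + (PySem.Str.len p + 1))]
        simp [pvAppAll]
        ring

lemma pv_appAll_toList (xs : List String) : ∀ (l : String),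
    (pvAppAll l xs).toList = l.toList ++ xs.flatMap (fun w => ' ' :: w.toList) := by
  induction xs with
  | nil => intro l; simp [pvAppAll]
  | cons w ws ih =>
      intro l
      show (pvAppAll (l ++ " " ++ w) ws).toList = _
      rw [ih]
      simp [String.toList_append]

lemma pv_intercalate_sep (ls : List (List Char)) : ∀ (a : List Char),
    [' '].intercalate (a :: ls) = a ++ ls.flatMap (fun v => ' ' :: v) := by
  induction ls with
  | nil => intro a; simp [List.intercalate]
  | cons b bs ih =>
      intro a
      have h : [' '].intercalate (a :: b :: bs) = a ++ [' '] ++ [' '].intercalate (b :: bs) := by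
        simp [List.intercalate]
      rw [h, ih b]
      simp

-- stripping the single leading space from A's accumulated line gives the ' '-join of the words
lemma pv_strip_join (zs : List String) (hok : ∀ w ∈ zs, pvWordOK w.toList) :
    pvLstripSpace (pvAppAll "" zs) = PySem.Str.join " " zs := by
  have he : ("" : String).toList = [] := by decide
  have hsp : (" " : String).toList = [' '] := by decide
  apply String.ext
  rw [pvLstripSpace, PySem.Str.toList_join]
  have hmk : (String.ofList (((pvAppAll "" zs).toList).dropWhile (fun c => c == ' '))).toList
      = ((pvAppAll "" zs).toList).dropWhile (fun c => c == ' ') := by simp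
  rw [hmk, pv_appAll_toList, he, hsp, List.nil_append]
  cases zs with
  | nil => simp [PySem.Chars.join, List.intercalate]
  | cons w ws =>
      have hw := hok w (by simp)
      obtain ⟨hne, hns⟩ := hw
      obtain ⟨c, cs, hc⟩ := List.exists_cons_of_ne_nil hne
      have hcs : c ∈ w.toList := by rw [hc]; simp
      have hcns : PySem.Chars.isspace c = false := hns c hcs
      have hcsp : ¬ (c == ' ') = true := by
        intro h
        have hceq : c = ' ' := by simpa using h
        subst hceq
        simp [PySem.Chars.isspace] at hcns
      simp only [PySem.Chars.join, List.map_cons]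
      rw [pv_intercalate_sep (ws.map String.toList) w.toList]
      simp only [List.flatMap_cons, List.flatMap_map, List.cons_append]
      rw [hc]
      simp [List.dropWhile, hcsp]

-- ===== VERDICT (by name: the statement is the Claim_ definition above) =====
theorem contagem_de_caracteres_spec : Claim_equal_contagem_de_caracteres := by
  intro nome _
  unfold Spec_contagem_de_caracteres contagem_de_caracteres contagem_de_caracteres_alt
  have hsplit := pv_loop_split (PySem.Str.split₀ nome) "" "" 0
  have hfold : (PySem.Str.split₀ nome).foldl
      (fun (acc : String × String × Int) parte =>
        let tot := acc.2.2 + (PySem.Str.len parte + 1)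
        if tot < 30 then (acc.1 ++ " " ++ parte, acc.2.1, tot)
        else (acc.1, acc.2.1 ++ " " ++ parte, tot)) ("", "", 0)
      = (PySem.Str.split₀ nome).foldl pvStep ("", "", 0) := rfl
  simp only [hfold, hsplit]
  have hok := pv_split₀_ok nome
  rw [pv_strip_join _ (fun w hw => hok w (List.mem_of_mem_take hw)),
      pv_strip_join _ (fun w hw => hok w (List.mem_of_mem_drop hw))]
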